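-- pv_equiv track=rewrite | github.com/pranavkoushik/publisher-prod.1 | publisher_intel.py | is_aggregator_page
-- ===== SOURCE A (Python) =====
-- def is_aggregator_page(url):
--     # These patterns usually point to roundup or tracker pages instead of a
--     # single publisher-specific update, so we exclude them from the digest.
--     bad_patterns = [
--         "mass-layoffs",
--         "layoff-tracker",
--         "layoffs-tracker",
--         "job-cuts",
--         "job-losses",
--         "companies-that",
--         "company-list",
--         "list-of",
--         "roundup",
--         "weekly-roundup",
--         "monthly-roundup",
--         "latest-updates",
--         "industry-updates",
--         "market-update",
--     ]
--
--     url_lower = url.lower()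
--     return any(pattern in url_lower for pattern in bad_patterns)
-- ===== SOURCE B (Python) =====
-- BAD_PATTERNS = [
--     "mass-layoffs",
--     "layoff-tracker",
--     "layoffs-tracker",
--     "job-cuts",
--     "job-losses",
--     "companies-that",
--     "company-list",
--     "list-of",
--     "roundup",
--     "weekly-roundup",
--     "monthly-roundup",
--     "latest-updates",
--     "industry-updates",
--     "market-update",
-- ]
--
-- # Patterns indexed by their first character, built once at import time, so the
-- # URL is scanned in a single pass: at each position only the patterns that
-- # could possibly start there are tried.
-- _BY_FIRST = {}
-- for _p in BAD_PATTERNS: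
--     _BY_FIRST.setdefault(_p[0], []).append(_p)
--
--
-- def is_aggregator_page(url):
--     s = url.lower()
--     for i, ch in enumerate(s):
--         for p in _BY_FIRST.get(ch, ()):
--             if s.startswith(p, i):
--                 return True
--     return False
-- ===== Notes on version B (the rewrite author's own statement) =====
-- stated objective: alternative
-- what changed: Replaced the per-pattern full substring search (any(p in url_lower)) with a single left-to-right scan of the lowered URL driven by a first-character index of the patterns, so each position only tries patterns that can start there.
import Mathlib
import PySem

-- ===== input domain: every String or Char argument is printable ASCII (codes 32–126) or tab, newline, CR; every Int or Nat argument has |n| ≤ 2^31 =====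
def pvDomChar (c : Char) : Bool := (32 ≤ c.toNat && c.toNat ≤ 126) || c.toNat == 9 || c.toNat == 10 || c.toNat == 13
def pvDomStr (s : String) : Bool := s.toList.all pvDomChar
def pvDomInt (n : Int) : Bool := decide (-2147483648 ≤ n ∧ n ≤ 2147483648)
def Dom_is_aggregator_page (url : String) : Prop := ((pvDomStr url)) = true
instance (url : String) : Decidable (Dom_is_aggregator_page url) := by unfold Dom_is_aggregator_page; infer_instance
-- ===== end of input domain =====

-- B scans the lowered URL once, using a first-character index of the patterns
-- built ahead of time, instead of one full substring search per pattern (alternative).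

-- ===== PORT A =====
def pvBadPatterns : List String := [
  "mass-layoffs", "layoff-tracker", "layoffs-tracker", "job-cuts", "job-losses",
  "companies-that", "company-list", "list-of", "roundup", "weekly-roundup",
  "monthly-roundup", "latest-updates", "industry-updates", "market-update"]

def is_aggregator_page (url : String) : Bool :=
  let url_lower := PySem.Str.lower url
  pvBadPatterns.any (fun pattern => PySem.Str.isIn pattern url_lower)

-- ===== PORT B =====
-- _p[0]: every pattern is a nonempty literal, so headD is exact here
def pvFirst (p : String) : Char := p.toList.headD ' '

-- _BY_FIRST: setdefault(k, []).append(p) on a dict value = modify with default []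
def pvByFirst : PySem.Dict Char (List String) :=
  pvBadPatterns.foldl (fun d p => d.modify (pvFirst p) [] (· ++ [p])) PySem.Dict.empty

-- s.startswith(p, i), where i ≥ 0 always (it comes from enumerate)
def pvStartsAt (s : List Char) (i : Int) (p : String) : Bool :=
  PySem.Chars.startswith (s.drop i.toNat) p.toList

-- the 'for i, ch in enumerate(s)' loop with its early return
def pvScanB (s : List Char) : List (Int × Char) → Bool
  | [] => false
  | (i, ch) :: rest =>
      if (pvByFirst.getD ch []).any (pvStartsAt s i) then true else pvScanB s rest

def is_aggregator_page_alt (url : String) : Bool :=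
  let s := PySem.Chars.lower url.toList
  pvScanB s (PySem.List.enumerate s)

-- ===== PRECONDITION & SPEC =====
def Spec_is_aggregator_page (url : String) (out : Bool) : Prop := out = is_aggregator_page_alt url
instance (url : String) (out : Bool) : Decidable (Spec_is_aggregator_page url out) := by unfold Spec_is_aggregator_page; infer_instance

-- ===== CLAIM (what is proved, stated in full; the proofs are below) =====
def Claim_equal_is_aggregator_page : Prop := ∀ (url : String), Dom_is_aggregator_page url → Spec_is_aggregator_page url (is_aggregator_page url)

-- ===== LEMMAS AND PROOFS =====

-- the first-character index holds exactly the patterns starting with that character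
theorem pvByFirst_getD (ch : Char) :
    pvByFirst.getD ch [] = pvBadPatterns.filter (fun p => pvFirst p == ch) := by
  unfold pvByFirst
  have hfold : pvBadPatterns.foldl
      (fun (d : PySem.Dict Char (List String)) p => d.modify (pvFirst p) [] (· ++ [p]))
      PySem.Dict.empty
      = (pvBadPatterns.map (fun p => (pvFirst p, p))).foldl
        (fun d q => d.modify q.1 [] (· ++ [q.2])) PySem.Dict.empty :=
    (List.foldl_map (f := fun p => (pvFirst p, p))
      (g := fun (d : PySem.Dict Char (List String)) q => d.modify q.1 [] (· ++ [q.2]))).symm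
  rw [hfold, PySem.Dict.getD_foldl_modify_append]
  simp [List.filter_map, Function.comp_def]

-- the scan returns true iff some enumerated position fires
theorem pvScanB_iff (s : List Char) (l : List (Int × Char)) :
    pvScanB s l = true ↔ ∃ q ∈ l, (pvByFirst.getD q.2 []).any (pvStartsAt s q.1) = true := by
  induction l with
  | nil => simp [pvScanB]
  | cons q rest ih =>
    obtain ⟨i, ch⟩ := q
    simp only [pvScanB, List.mem_cons]
    split_ifs with h
    · exact ⟨fun _ => ⟨(i, ch), Or.inl rfl, h⟩, fun _ => rfl⟩
    · rw [ih]
      constructor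
      · rintro ⟨q, hq, hfire⟩; exact ⟨q, Or.inr hq, hfire⟩
      · rintro ⟨q, hq | hq, hfire⟩
        · cases hq; exact absurd hfire (by simp [h])
        · exact ⟨q, hq, hfire⟩

theorem pvBadPatterns_ne_nil : ∀ p ∈ pvBadPatterns, p.toList ≠ [] := by decide

-- ===== VERDICT (by name: the statement is the Claim_ definition above) =====
theorem is_aggregator_page_spec : Claim_equal_is_aggregator_page := by
  intro url _
  unfold Spec_is_aggregator_page is_aggregator_page is_aggregator_page_alt
  set s := PySem.Chars.lower url.toList with hs
  rw [Bool.eq_iff_iff, List.any_eq_true, pvScanB_iff]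
  constructor
  · rintro ⟨p, hp, hin⟩
    rw [PySem.Str.isIn_eq, PySem.Str.toList_lower, ← hs] at hin
    obtain ⟨j, hpre⟩ := (PySem.Chars.exists_prefix_drop_iff_isIn p.toList s).2 hin
    obtain ⟨c, cs, hc⟩ := List.exists_cons_of_ne_nil (pvBadPatterns_ne_nil p hp)
    -- p is nonempty, so its match starts at a real position j < s.length
    have hjlt : j < s.length := by
      by_contra hge
      rw [List.drop_eq_nil_of_le (Nat.le_of_not_lt hge)] at hpre
      exact pvBadPatterns_ne_nil p hp (List.prefix_nil.mp hpre)
    refine ⟨((j : Int), s[j]), ?_, ?_⟩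
    · rw [PySem.List.mem_enumerate_iff]
      exact ⟨j, hjlt, by simp⟩
    · rw [List.any_eq_true]
      refine ⟨p, ?_, ?_⟩
      · rw [pvByFirst_getD, List.mem_filter]
        refine ⟨hp, ?_⟩
        -- the pattern's first char is s[j], the char at the match position
        have : (s.drop j).head? = some c := by
          obtain ⟨t, ht⟩ := hpre
          rw [hc] at ht; rw [← ht]; rfl
        rw [List.head?_drop] at this
        simp only [List.getElem?_eq_getElem hjlt, Option.some_inj] at this
        simp [pvFirst, hc, this]
      · rw [pvStartsAt, Int.toNat_natCast]
        exact (PySem.Chars.startswith_iff _ _).2 hpre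
  · rintro ⟨⟨i, ch⟩, hq, hfire⟩
    rw [List.any_eq_true] at hfire
    obtain ⟨p, hpmem, hsw⟩ := hfire
    rw [pvByFirst_getD, List.mem_filter] at hpmem
    refine ⟨p, hpmem.1, ?_⟩
    rw [PySem.Str.isIn_eq, PySem.Str.toList_lower, ← hs]
    rw [pvStartsAt] at hsw
    exact (PySem.Chars.exists_prefix_drop_iff_isIn p.toList s).1
      ⟨i.toNat, (PySem.Chars.startswith_iff _ _).1 hsw⟩
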